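-- pv_equiv track=rewrite | github.com/akulacsathish-eng/CDA3100-Spring2026 | Memory_Vault_System/part2/y86_sim.py | generate_vault
-- ===== SOURCE A (Python) =====
-- from typing import List, Dict, Tuple, Union
--
-- def lcg_next(state: int) -> Tuple[int, int]:
--     """Linear congruential generator yielding next state and value."""
--     next_state = (state * 1664525 + 1013904223) & 0x7FFFFFFF
--     return next_state, next_state
--
-- def generate_vault(seed: int) -> List[List[str]]:
--     """Generate the 8×12 vault of characters for password recovery."""
--     state = seed
--     vault: List[List[str]] = [[None for _ in range(12)] for _ in range(8)]
--     for i in range(8):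
--         for j in range(12):
--             state, r = lcg_next(state)
--             vault[i][j] = chr(ord('A') + (r % 26))
--     return vault
-- ===== SOURCE B (Python) =====
-- def _jump(n):
--     """Affine map (A, C) with f^n(x) = (A*x + C) & 0x7FFFFFFF, where f is the LCG
--     step, computed by binary exponentiation (composition doubling)."""
--     if n == 0:
--         return (1, 0)
--     A, C = _jump(n // 2)
--     A, C = (A * A) & 0x7FFFFFFF, (A * C + C) & 0x7FFFFFFF
--     if n % 2 == 1:
--         A, C = (1664525 * A) & 0x7FFFFFFF, (1664525 * C + 1013904223) & 0x7FFFFFFF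
--     return (A, C)
--
-- def generate_vault(seed):
--     def cell(n):
--         A, C = _jump(n)
--         return chr(ord('A') + (((A * seed + C) & 0x7FFFFFFF) % 26))
--     return [[cell(i * 12 + j + 1) for j in range(12)] for i in range(8)]
-- ===== Notes on version B (the rewrite author's own statement) =====
-- stated objective: alternative
-- what changed: B replaces A's sequential LCG state thread (one step per cell, state carried across the whole grid) with random access: each cell's state is computed independently as the corresponding iterate of the affine LCG map, obtained by binary exponentiation (composition doubling) of affine maps modulo the mask.
import Mathlib
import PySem

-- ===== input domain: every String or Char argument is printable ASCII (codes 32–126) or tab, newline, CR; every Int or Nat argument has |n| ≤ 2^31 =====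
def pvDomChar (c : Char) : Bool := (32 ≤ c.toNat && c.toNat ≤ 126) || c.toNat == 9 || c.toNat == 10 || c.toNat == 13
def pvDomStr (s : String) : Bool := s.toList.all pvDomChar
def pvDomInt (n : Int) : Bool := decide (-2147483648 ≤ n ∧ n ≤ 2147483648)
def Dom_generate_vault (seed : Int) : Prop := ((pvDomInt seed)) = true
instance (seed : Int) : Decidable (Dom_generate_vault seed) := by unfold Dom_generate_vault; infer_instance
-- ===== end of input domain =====

-- B computes each cell independently as the n-th LCG iterate f^n(seed) via binary exponentiation of
-- affine maps mod 2^31 (random access), instead of A's sequential 96-step state thread (alternative algorithm).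

-- ===== PORT A =====
def lcg_next (state : Int) : Int × Int :=
  let next_state := PySem.Int.band (state * 1664525 + 1013904223) 0x7FFFFFFF
  (next_state, next_state)

def generate_vault (seed : Int) : List (List String) :=
  -- the Python pre-allocates a None grid and assigns vault[i][j] in row-major order;
  -- ported as nested folds building each row left to right (same assignment order, same values)
  (((PySem.List.pyRange 0 8 1).foldl (fun (acc : Int × List (List String)) _ =>
      let inner := (PySem.List.pyRange 0 12 1).foldl (fun (acc2 : Int × List String) _ =>
          let (state, r) := lcg_next acc2.1
          (state, acc2.2 ++ [String.ofList [Char.ofNat (65 + (PySem.Int.mod r 26).toNat)]])) (acc.1, [])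
      (inner.1, acc.2 ++ [inner.2])) (seed, []))).2

-- ===== PORT B =====
-- Source B's _jump: affine map (A, C) with f^n(x) = (A*x + C) & 0x7FFFFFFF, by composition doubling.
-- (Source B's argument n is the nonnegative cell index i*12+j+1, ported as a Nat for the n//2 recursion.)
def pvJumpB (n : Nat) : Int × Int :=
  if h : n = 0 then (1, 0)
  else
    let p := pvJumpB (n / 2)
    let q : Int × Int :=
      (PySem.Int.band (p.1 * p.1) 0x7FFFFFFF, PySem.Int.band (p.1 * p.2 + p.2) 0x7FFFFFFF)
    if n % 2 = 1 then
      (PySem.Int.band (1664525 * q.1) 0x7FFFFFFF, PySem.Int.band (1664525 * q.2 + 1013904223) 0x7FFFFFFF)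
    else q
decreasing_by exact Nat.div_lt_self (Nat.pos_of_ne_zero h) one_lt_two

-- Source B's local 'cell' (the tuple unpacking 'A, C = _jump(n)' is ported as the two projections)
def pvCellB (seed : Int) (n : Nat) : String :=
  String.ofList [Char.ofNat (65 +
    (PySem.Int.mod (PySem.Int.band ((pvJumpB n).1 * seed + (pvJumpB n).2) 0x7FFFFFFF) 26).toNat)]

def generate_vault_alt (seed : Int) : List (List String) :=
  (List.range 8).map (fun i => (List.range 12).map (fun j => pvCellB seed (i * 12 + j + 1)))

-- ===== PRECONDITION & SPEC =====
def Spec_generate_vault (seed : Int) (out : List (List String)) : Prop := out = generate_vault_alt seed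
instance (seed : Int) (out : List (List String)) : Decidable (Spec_generate_vault seed out) := by unfold Spec_generate_vault; infer_instance

-- ===== CLAIM (what is proved, stated in full; the proofs are below) =====
def Claim_equal_generate_vault : Prop := ∀ (seed : Int), Dom_generate_vault seed → Spec_generate_vault seed (generate_vault seed)

-- ===== LEMMAS AND PROOFS =====
-- proof-only helpers: one LCG step, the emitted character, the state after n steps,
-- A's row structure (pvGen/pvRows) with its outer-loop state pvAdvR
def pvStep (st : Int) : Int := PySem.Int.band (st * 1664525 + 1013904223) 0x7FFFFFFF
def pvCh (st : Int) : String := String.ofList [Char.ofNat (65 + (PySem.Int.mod st 26).toNat)]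
def pvAdv : Nat → Int → Int
  | 0, st => st
  | n+1, st => pvAdv n (pvStep st)
def pvGen : Nat → Int → List String
  | 0, _ => []
  | n+1, st => pvCh (pvStep st) :: pvGen n (pvStep st)
def pvRows : Nat → Int → List (List String)
  | 0, _ => []
  | n+1, st => pvGen 12 st :: pvRows n (pvAdv 12 st)
def pvAdvR : Nat → Int → Int
  | 0, st => st
  | n+1, st => pvAdvR n (pvAdv 12 st)

-- masking by 0x7FFFFFFF is reduction mod 2^31 (Python semantics, any sign)
theorem band_M (x : Int) : PySem.Int.band x 0x7FFFFFFF = x % 2147483648 := by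
  unfold PySem.Int.band
  by_cases hx : 0 ≤ x
  · rw [if_pos hx, if_pos (by norm_num)]
    obtain ⟨m0, hm0⟩ : ∃ m0, x.toNat = m0 := ⟨_, rfl⟩
    have h := Nat.and_two_pow_sub_one_eq_mod m0 31
    norm_num at h
    rw [show ((0x7FFFFFFF : Int)).toNat = 2147483647 from rfl, hm0, h]
    omega
  · rw [if_neg hx, if_pos (by norm_num)]
    obtain ⟨m0, hm0⟩ : ∃ m0, (-x - 1).toNat = m0 := ⟨_, rfl⟩
    have h := Nat.and_two_pow_sub_one_eq_mod m0 31
    norm_num at h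
    rw [show ((0x7FFFFFFF : Int)).toNat = 2147483647 from rfl, hm0, Nat.land_comm, h]
    omega

theorem step_mod (x : Int) : pvStep (x % 2147483648) = pvStep x := by
  unfold pvStep; rw [band_M, band_M]; omega

theorem step_reduced (x : Int) : pvStep x % 2147483648 = pvStep x := by
  unfold pvStep; rw [band_M]; omega

theorem adv_succ' (n : Nat) (x : Int) : pvAdv (n + 1) x = pvStep (pvAdv n x) := by
  induction n generalizing x with
  | zero => rfl
  | succ k ih => show pvAdv (k+1) (pvStep x) = _; rw [ih]; rfl

theorem adv_add (a b : Nat) (x : Int) : pvAdv (a + b) x = pvAdv b (pvAdv a x) := by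
  induction b with
  | zero => rfl
  | succ k ih => rw [show a + (k+1) = (a+k) + 1 from rfl, adv_succ', ih, ← adv_succ']

theorem adv_reduced (n : Nat) (x : Int) (h : 1 ≤ n) : pvAdv n x % 2147483648 = pvAdv n x := by
  obtain ⟨k, rfl⟩ := Nat.exists_eq_add_of_le h
  rw [Nat.add_comm, adv_succ']
  exact step_reduced _

theorem adv_mod (n : Nat) (x : Int) (h : 1 ≤ n) : pvAdv n (x % 2147483648) = pvAdv n x := by
  obtain ⟨k, rfl⟩ := Nat.exists_eq_add_of_le h
  rw [adv_add 1 k, adv_add 1 k]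
  show pvAdv k (pvStep (x % 2147483648)) = pvAdv k (pvStep x)
  rw [step_mod]

-- composing a reduced affine step (a, c) after an already-reduced affine map
theorem compose_spec (a c A C x : Int) :
    PySem.Int.band ((PySem.Int.band (a * A) 0x7FFFFFFF) * x + PySem.Int.band (a * C + c) 0x7FFFFFFF) 0x7FFFFFFF
      = PySem.Int.band (a * PySem.Int.band (A * x + C) 0x7FFFFFFF + c) 0x7FFFFFFF := by
  simp only [band_M]
  show Int.ModEq 2147483648 _ _
  have base : ∀ z : Int, Int.ModEq 2147483648 (z % 2147483648) z := fun z =>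
    (Int.emod_emod_of_dvd z dvd_rfl : z % 2147483648 % 2147483648 = z % 2147483648)
  have hL : Int.ModEq 2147483648 ((a * A % 2147483648) * x + (a * C + c) % 2147483648)
      (a * A * x + (a * C + c)) :=
    Int.ModEq.add ((base (a * A)).mul_right x) (base (a * C + c))
  have hR : Int.ModEq 2147483648 (a * ((A * x + C) % 2147483648) + c) (a * (A * x + C) + c) :=
    (Int.ModEq.mul_left a (base (A * x + C))).add_right c
  have e : a * A * x + (a * C + c) = a * (A * x + C) + c := by ring
  rw [e] at hL
  exact hL.trans hR.symm

-- main: the affine jump computes the n-th LCG iterate (reduced mod 2^31)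
theorem jumpB_zero : pvJumpB 0 = (1, 0) := by
  rw [pvJumpB]
  rfl

theorem jumpB_odd (n : Nat) (hn : n ≠ 0) (ho : n % 2 = 1) :
    pvJumpB n =
      (PySem.Int.band (1664525 * PySem.Int.band ((pvJumpB (n / 2)).1 * (pvJumpB (n / 2)).1) 0x7FFFFFFF) 0x7FFFFFFF,
       PySem.Int.band (1664525 * PySem.Int.band ((pvJumpB (n / 2)).1 * (pvJumpB (n / 2)).2 + (pvJumpB (n / 2)).2) 0x7FFFFFFF + 1013904223) 0x7FFFFFFF) := by
  rw [pvJumpB, dif_neg hn]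
  show (if n % 2 = 1 then _ else _) = _
  rw [if_pos ho]

theorem jumpB_even (n : Nat) (hn : n ≠ 0) (he : ¬ n % 2 = 1) :
    pvJumpB n =
      (PySem.Int.band ((pvJumpB (n / 2)).1 * (pvJumpB (n / 2)).1) 0x7FFFFFFF,
       PySem.Int.band ((pvJumpB (n / 2)).1 * (pvJumpB (n / 2)).2 + (pvJumpB (n / 2)).2) 0x7FFFFFFF) := by
  rw [pvJumpB, dif_neg hn]
  show (if n % 2 = 1 then _ else _) = _
  rw [if_neg he]

theorem jump_spec : ∀ (n : Nat) (x : Int),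
    PySem.Int.band ((pvJumpB n).1 * x + (pvJumpB n).2) 0x7FFFFFFF = pvAdv n x % 2147483648 := by
  intro n
  induction n using Nat.strong_induction_on with
  | _ n ih =>
    by_cases hn : n = 0
    · subst hn
      intro x
      rw [jumpB_zero, show ((1, 0) : Int × Int).1 * x + ((1, 0) : Int × Int).2 = x by ring, band_M]
      rfl
    · intro x
      have hlt : n / 2 < n := Nat.div_lt_self (Nat.pos_of_ne_zero hn) one_lt_two
      have ihk := ih (n / 2) hlt
      have hq : ∀ y : Int, PySem.Int.band
          (PySem.Int.band ((pvJumpB (n / 2)).1 * (pvJumpB (n / 2)).1) 0x7FFFFFFF * y +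
            PySem.Int.band ((pvJumpB (n / 2)).1 * (pvJumpB (n / 2)).2 + (pvJumpB (n / 2)).2) 0x7FFFFFFF) 0x7FFFFFFF
          = pvAdv (2 * (n / 2)) y % 2147483648 := by
        intro y
        rw [compose_spec, ihk y, ihk (pvAdv (n / 2) y % 2147483648)]
        by_cases hk0 : n / 2 = 0
        · rw [hk0]
          show y % 2147483648 % 2147483648 = pvAdv (2 * 0) y % 2147483648
          show y % 2147483648 % 2147483648 = y % 2147483648
          omega
        · rw [adv_mod (n / 2) _ (Nat.one_le_iff_ne_zero.mpr hk0), ← adv_add,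
            show n / 2 + n / 2 = 2 * (n / 2) by omega]
      by_cases hodd : n % 2 = 1
      · rw [jumpB_odd n hn hodd]
        show PySem.Int.band
          (PySem.Int.band (1664525 * PySem.Int.band ((pvJumpB (n / 2)).1 * (pvJumpB (n / 2)).1) 0x7FFFFFFF) 0x7FFFFFFF * x +
            PySem.Int.band (1664525 * PySem.Int.band ((pvJumpB (n / 2)).1 * (pvJumpB (n / 2)).2 + (pvJumpB (n / 2)).2) 0x7FFFFFFF + 1013904223) 0x7FFFFFFF) 0x7FFFFFFF
          = pvAdv n x % 2147483648
        rw [compose_spec, hq x]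
        have hstep : PySem.Int.band (1664525 * (pvAdv (2 * (n / 2)) x % 2147483648) + 1013904223) 0x7FFFFFFF
            = pvStep (pvAdv (2 * (n / 2)) x % 2147483648) := by
          unfold pvStep; rw [band_M, band_M]; ring_nf
        rw [hstep, step_mod, ← adv_succ', show 2 * (n / 2) + 1 = n by omega,
          adv_reduced n x (by omega)]
      · rw [jumpB_even n hn hodd]
        have h2 : 2 * (n / 2) = n := by omega
        rw [hq x, h2]

theorem cell_eq (seed : Int) (n : Nat) (h : 1 ≤ n) : pvCellB seed n = pvCh (pvAdv n seed) := by
  unfold pvCellB pvCh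
  rw [jump_spec, adv_reduced _ _ h]

-- invariant of A's outer loop: it appends one 12-character row per iteration
theorem outerL : ∀ (l : List Int) (st : Int) (acc : List (List String)),
    l.foldl (fun (acc : Int × List (List String)) _ =>
      let inner := (PySem.List.pyRange 0 12 1).foldl (fun (acc2 : Int × List String) _ =>
          let (state, r) := lcg_next acc2.1
          (state, acc2.2 ++ [String.ofList [Char.ofNat (65 + (PySem.Int.mod r 26).toNat)]])) (acc.1, [])
      (inner.1, acc.2 ++ [inner.2])) (st, acc)
    = (pvAdvR l.length st, acc ++ pvRows l.length st) := by
  intro l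
  induction l with
  | nil => intro st acc; simp [pvAdvR, pvRows]
  | cons x xs ih =>
    intro st acc
    rw [List.foldl_cons]
    exact (ih (pvAdv 12 st) (acc ++ [pvGen 12 st])).trans (by simp [pvAdvR, pvRows])

theorem gen_eq (n : Nat) (st : Int) :
    pvGen n st = (List.range n).map (fun j => pvCh (pvAdv (j + 1) st)) := by
  induction n generalizing st with
  | zero => rfl
  | succ k ih =>
    rw [List.range_succ_eq_map, List.map_cons, List.map_map]
    refine congrArg₂ List.cons rfl ?_
    rw [show pvGen k (pvStep st) = pvGen k (pvStep st) from rfl, ih]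
    apply List.map_congr_left
    intro j _
    show pvCh (pvAdv (j + 1) (pvStep st)) = pvCh (pvAdv (j + 1 + 1) st)
    rw [show j + 1 + 1 = 1 + (j + 1) by omega, adv_add 1 (j + 1)]
    rfl

theorem rows_eq (k : Nat) (st : Int) :
    pvRows k st = (List.range k).map (fun i => pvGen 12 (pvAdv (12 * i) st)) := by
  induction k generalizing st with
  | zero => rfl
  | succ m ih =>
    rw [List.range_succ_eq_map, List.map_cons, List.map_map]
    show pvGen 12 st :: pvRows m (pvAdv 12 st) = _
    refine congrArg₂ List.cons rfl ?_
    rw [ih]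
    apply List.map_congr_left
    intro i _
    show pvGen 12 (pvAdv (12 * i) (pvAdv 12 st)) = pvGen 12 (pvAdv (12 * (i + 1)) st)
    rw [show 12 * (i + 1) = 12 + 12 * i by ring, adv_add]

-- ===== VERDICT (by name: the statement is the Claim_ definition above) =====
set_option maxRecDepth 8192 in
theorem generate_vault_spec : Claim_equal_generate_vault := by
  intro seed _
  show generate_vault seed = generate_vault_alt seed
  have hA : generate_vault seed = pvRows 8 seed := by
    unfold generate_vault
    rw [outerL]
    rfl
  rw [hA, rows_eq, generate_vault_alt]
  show _ = (List.range 8).map _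
  apply List.map_congr_left
  intro i _
  rw [gen_eq]
  apply List.map_congr_left
  intro j _
  rw [cell_eq seed _ (by omega), show i * 12 + j + 1 = 12 * i + (j + 1) by ring,
    adv_add (12 * i) (j + 1)]
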